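-- pv_equiv track=rewrite | github.com/ilanvys/Cartoonify | cartoonify.py | separate_channels
-- ===== SOURCE A (Python) =====
-- def separate_channels(image):
--     '''
--     Recieves an image with multiple color channels and seperates
--     the image into multiple pictures of a single channel.
--     :param image: The multi-channel image
--     :return: array of single-channel images
--     '''
--     separate_channels_arr = []
--     channels_num = len(image[0][0])
--
--     for channel in range(0, channels_num):
--         separate_channels_arr.append([])
--
--         for row in range(0, len(image)):
--             separate_channels_arr[channel].append([])
--
--             for col in range(0, len(image[row])):
--                 separate_channels_arr[channel][row].append(
--                     image[row][col][channel])
--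
--     return separate_channels_arr
-- ===== SOURCE B (Python) =====
-- def separate_channels(image):
--     '''
--     Single pass over the rows: split each row into its per-channel value
--     lists and append them to every channel image as the rows stream by,
--     instead of re-walking the whole image once per channel.
--     '''
--     channels_num = len(image[0][0])
--     channels = [[] for _ in range(channels_num)]
--     for row in image:
--         channels = [chan + [[pixel[ch] for pixel in row]]
--                     for ch, chan in enumerate(channels)]
--     return channels
-- ===== Notes on version B (the rewrite author's own statement) =====
-- stated objective: alternative
-- what changed: B streams over the rows once, splitting each row into per-channel value lists (via enumerate over the channel accumulators) and extending every channel image as rows arrive, instead of A's channel-outer triple loop that re-walks the whole image once per channel with explicit row/col/channel indices.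
import Mathlib
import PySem

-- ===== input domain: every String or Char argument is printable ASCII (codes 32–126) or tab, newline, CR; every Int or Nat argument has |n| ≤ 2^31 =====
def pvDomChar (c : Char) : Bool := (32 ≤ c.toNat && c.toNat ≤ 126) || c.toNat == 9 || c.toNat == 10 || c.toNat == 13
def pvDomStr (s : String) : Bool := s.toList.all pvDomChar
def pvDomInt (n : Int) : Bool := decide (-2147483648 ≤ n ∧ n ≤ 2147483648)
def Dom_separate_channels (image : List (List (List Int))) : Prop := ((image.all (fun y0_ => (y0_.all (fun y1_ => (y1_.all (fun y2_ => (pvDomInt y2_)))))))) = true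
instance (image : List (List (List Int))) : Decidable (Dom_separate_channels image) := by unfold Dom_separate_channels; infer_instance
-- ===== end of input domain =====

-- B regroups the image row-by-row in a single pass instead of A's channel-outer index loops; same cost, different traversal.

-- ===== PORT A =====
-- literal transliteration of A: channels_num = len(image[0][0]); three nested index
-- loops (channel, row, col), each level appending to the structure built so far.
-- The pyGetD defaults are never reached under Pre_ (every index is in range there).
def separate_channels (image : List (List (List Int))) : List (List (List Int)) :=
  let channels_num : Int :=
    PySem.List.len (PySem.List.pyGetD (PySem.List.pyGetD image 0 []) 0 [])
  (PySem.List.pyRange 0 channels_num 1).foldl (fun arr channel =>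
    arr ++ [(PySem.List.pyRange 0 (PySem.List.len image) 1).foldl (fun chanImg row =>
      chanImg ++ [(PySem.List.pyRange 0 (PySem.List.len (PySem.List.pyGetD image row [])) 1).foldl
        (fun rowAcc col =>
          rowAcc ++ [PySem.List.pyGetD (PySem.List.pyGetD (PySem.List.pyGetD image row []) col []) channel 0])
        ([] : List Int)]) ([] : List (List Int))]) []

-- ===== PORT B =====
-- literal transliteration of B: start with channels_num empty channel images and fold
-- over the rows once, extending every channel image (enumerate supplies the channel
-- index) with that row's values for its channel.
def separate_channels_alt (image : List (List (List Int))) : List (List (List Int)) :=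
  let channels_num : Nat := ((image.getD 0 []).getD 0 []).length
  let init : List (List (List Int)) := (List.range channels_num).map (fun _ => [])
  image.foldl (fun channels row =>
    (PySem.List.enumerate channels).map (fun p =>
      p.2 ++ [row.map (fun pixel => PySem.List.pyGetD pixel p.1 0)])) init

-- ===== PRECONDITION & SPEC =====
-- Pre_ excludes exactly the inputs where Python A raises IndexError: an empty image,
-- an empty first row, or some pixel shorter than image[0][0] (B raises there too).
def Pre_separate_channels (image : List (List (List Int))) : Prop :=
  image ≠ [] ∧ image.getD 0 [] ≠ [] ∧
    ∀ row ∈ image, ∀ px ∈ row, ((image.getD 0 []).getD 0 []).length ≤ px.length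
instance (image : List (List (List Int))) : Decidable (Pre_separate_channels image) := by
  unfold Pre_separate_channels; infer_instance

def pvWitness_separate_channels : List (List (List Int)) :=
  [[[1, 2], [3, 4]], [[5, 6]]]

def Spec_separate_channels (image : List (List (List Int))) (out : List (List (List Int))) : Prop := out = separate_channels_alt image
instance (image : List (List (List Int))) (out : List (List (List Int))) : Decidable (Spec_separate_channels image out) := by unfold Spec_separate_channels; infer_instance

-- ===== CLAIM (what is proved, stated in full; the proofs are below) =====
def Claim_equal_separate_channels : Prop := ∀ (image : List (List (List Int))), Dom_separate_channels image → Pre_separate_channels image → Spec_separate_channels image (separate_channels image)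

-- ===== LEMMAS AND PROOFS =====

-- the common canonical value: channel ch of the image, as one nested map
def pvChan (image : List (List (List Int))) (ch : Int) : List (List Int) :=
  image.map (fun row => row.map (fun px => PySem.List.pyGetD px ch 0))

-- composed form of the cited PySem.List.map_pyGetD_pyRange_zero (F applied to each fetched element)
theorem map_pyGetD_range {a b : Type} (xs : List a) (d : a) (F : a → b) :
    (PySem.List.pyRange 0 (PySem.List.len xs)).map (fun j => F (PySem.List.pyGetD xs j d)) = xs.map F := by
  rw [show (fun j => F (PySem.List.pyGetD xs j d)) = F ∘ (fun j => PySem.List.pyGetD xs j d) from rfl,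
    ← List.map_map, PySem.List.map_pyGetD_pyRange_zero]

theorem separate_channels_eq_canon (image : List (List (List Int))) :
    separate_channels image
      = (List.range ((image.getD 0 []).getD 0 []).length).map
          (fun (k : Nat) => pvChan image (k : Int)) := by
  simp only [separate_channels, PySem.List.foldl_append_singleton_eq_map, List.nil_append]
  have hG : (fun (channel : Int) =>
      (PySem.List.pyRange 0 (PySem.List.len image)).map (fun row =>
        (PySem.List.pyRange 0 (PySem.List.len (PySem.List.pyGetD image row []))).map
          (fun col => PySem.List.pyGetD (PySem.List.pyGetD (PySem.List.pyGetD image row []) col []) channel 0)))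
      = fun (channel : Int) => pvChan image channel := by
    funext channel
    rw [map_pyGetD_range image [] (fun rowL =>
      (PySem.List.pyRange 0 (PySem.List.len rowL)).map
        (fun col => PySem.List.pyGetD (PySem.List.pyGetD rowL col []) channel 0))]
    unfold pvChan
    apply List.map_congr_left
    intro rowL _
    rw [map_pyGetD_range rowL [] (fun px => PySem.List.pyGetD px channel 0)]
  rw [hG, PySem.List.pyGetD_zero, PySem.List.pyGetD_zero, PySem.List.len,
    PySem.List.pyRange_zero_nat, List.map_map]
  rfl

theorem enumerate_map_range {a : Type} (c : Nat) (g : Nat → a) (s : Int) :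
    PySem.List.enumerate ((List.range c).map g) s
      = (List.range c).map (fun (k : Nat) => (s + (k : Int), g k)) := by
  induction c generalizing s with
  | zero => simp [PySem.List.enumerate_nil]
  | succ n ih =>
    rw [List.range_succ, List.map_append, List.map_append, PySem.List.enumerate_append, ih]
    simp [PySem.List.enumerate_cons, PySem.List.enumerate_nil]

-- loop invariant of B's fold over the rows
theorem alt_loop (rows : List (List (List Int))) (c : Nat) (g : Nat → List (List Int)) :
    rows.foldl (fun channels row =>
        (PySem.List.enumerate channels).map (fun p =>
          p.2 ++ [row.map (fun pixel => PySem.List.pyGetD pixel p.1 0)]))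
      ((List.range c).map g)
      = (List.range c).map (fun (k : Nat) => g k ++ pvChan rows (k : Int)) := by
  induction rows generalizing g with
  | nil => simp [pvChan]
  | cons row rows ih =>
    rw [List.foldl_cons, enumerate_map_range, List.map_map]
    simp only [Function.comp_def, zero_add]
    rw [ih (fun (k : Nat) => g k ++ [row.map (fun pixel => PySem.List.pyGetD pixel (k : Int) 0)])]
    simp [pvChan, List.append_assoc]

theorem alt_eq_canon (image : List (List (List Int))) :
    separate_channels_alt image
      = (List.range ((image.getD 0 []).getD 0 []).length).map
          (fun (k : Nat) => pvChan image (k : Int)) := by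
  simp only [separate_channels_alt]
  rw [alt_loop image ((image.getD 0 []).getD 0 []).length (fun _ => [])]
  simp only [List.nil_append]

-- ===== VERDICT (by name: the statement is the Claim_ definition above) =====
theorem separate_channels_spec : Claim_equal_separate_channels := by
  intro image _ _
  unfold Spec_separate_channels
  rw [separate_channels_eq_canon, alt_eq_canon]
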